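-- pv_equiv track=rewrite | github.com/bojan2110/rbtl_graphrag | ai/agent/graph_analytics_agent.py | _summarize_schema_for_tool_selection
-- ===== SOURCE A (Python) =====
-- def _summarize_schema_for_tool_selection(full_schema: str) -> str:
--     """Create a concise schema summary with just node labels and relationship types.
--
--     This reduces prompt size while keeping essential information for tool selection.
--     """
--     if not full_schema or full_schema == "Graph schema not available.":
--         return full_schema
--
--     # Extract node labels and relationship types from the schema
--     # The schema format is:
--     # Node properties:
--     # :`Label` {props...}
--     # ...
--     # Relationship properties:
--     # :`REL_TYPE` {props...}
--     # ...
--     # The relationships: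
--     # (:Label)-[:REL_TYPE]->(:Label)
--
--     lines = full_schema.split('\n')
--     node_labels = []
--     rel_types = []
--     relationships = []
--
--     in_node_props = False
--     in_rel_props = False
--     in_rels = False
--
--     for line in lines:
--         if 'Node properties:' in line:
--             in_node_props = True
--             in_rel_props = False
--             in_rels = False
--             continue
--         elif 'Relationship properties:' in line:
--             in_node_props = False
--             in_rel_props = True
--             in_rels = False
--             continue
--         elif 'The relationships:' in line:
--             in_node_props = False
--             in_rel_props = False
--             in_rels = True
--             continue
--
--         if in_node_props and line.strip().startswith(':`'):
--             # Extract label: :`Label` {props...}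
--             label = line.split('`')[1] if '`' in line else None
--             if label:
--                 node_labels.append(label)
--         elif in_rel_props and line.strip().startswith(':`'):
--             # Extract relationship type: :`REL_TYPE` {props...}
--             rel_type = line.split('`')[1] if '`' in line else None
--             if rel_type:
--                 rel_types.append(rel_type)
--         elif in_rels and ')-[:' in line:
--             # Extract relationship: (:Label)-[:REL_TYPE]->(:Label)
--             relationships.append(line.strip())
--
--     # Build concise summary
--     summary_parts = []
--     if node_labels:
--         summary_parts.append(f"Node labels: {', '.join(sorted(set(node_labels)))}")
--     if rel_types:
--         summary_parts.append(f"Relationship types: {', '.join(sorted(set(rel_types)))}")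
--     if relationships:
--         summary_parts.append(f"Key relationships:\n" + "\n".join(relationships[:10]))  # Limit to first 10
--
--     return "\n".join(summary_parts) if summary_parts else "Graph schema summary not available."
-- ===== SOURCE B (Python) =====
-- def _summarize_schema_for_tool_selection(full_schema: str) -> str:
--     """Chunk-splitting rewrite: instead of a per-line flag state machine, cut
--     the line list into (section, chunk) pieces at header lines, then extract
--     labels/types/relationships from whole chunks at once."""
--     if not full_schema or full_schema == "Graph schema not available.":
--         return full_schema
--
--     def header_kind(line):
--         if 'Node properties:' in line:
--             return 1
--         if 'Relationship properties:' in line: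
--             return 2
--         if 'The relationships:' in line:
--             return 3
--         return 0
--
--     # Split the lines into chunks at header lines; each chunk is tagged with
--     # the section announced by the header preceding it (0 = before any header).
--     def chunks(ls, sec):
--         out = []
--         while True:
--             i = next((j for j, ln in enumerate(ls) if header_kind(ln)), None)
--             if i is None:
--                 out.append((sec, ls))
--                 return out
--             out.append((sec, ls[:i]))
--             sec, ls = header_kind(ls[i]), ls[i + 1:]
--
--     def names(chunk):
--         return [l.split('`')[1] for l in chunk
--                 if l.strip().startswith(':`') and '`' in l and l.split('`')[1]]
--
--     parts = chunks(full_schema.split('\n'), 0)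
--     node_labels = [n for sec, ch in parts if sec == 1 for n in names(ch)]
--     rel_types = [n for sec, ch in parts if sec == 2 for n in names(ch)]
--     relationships = [l.strip() for sec, ch in parts if sec == 3
--                      for l in ch if ')-[:' in l]
--
--     summary_parts = []
--     if node_labels:
--         summary_parts.append("Node labels: " + ", ".join(sorted(set(node_labels))))
--     if rel_types:
--         summary_parts.append("Relationship types: " + ", ".join(sorted(set(rel_types))))
--     if relationships:
--         summary_parts.append("Key relationships:\n" + "\n".join(relationships[:10]))
--
--     return "\n".join(summary_parts) if summary_parts else "Graph schema summary not available."
-- ===== Notes on version B (the rewrite author's own statement) =====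
-- stated objective: alternative
-- what changed: Replaces A's per-line state machine with three boolean section flags by a splitter that cuts the line list into section-tagged chunks at header lines (scan for the next header, slice, repeat) and then extracts labels/types/relationships from whole chunks with comprehensions.
import Mathlib
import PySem

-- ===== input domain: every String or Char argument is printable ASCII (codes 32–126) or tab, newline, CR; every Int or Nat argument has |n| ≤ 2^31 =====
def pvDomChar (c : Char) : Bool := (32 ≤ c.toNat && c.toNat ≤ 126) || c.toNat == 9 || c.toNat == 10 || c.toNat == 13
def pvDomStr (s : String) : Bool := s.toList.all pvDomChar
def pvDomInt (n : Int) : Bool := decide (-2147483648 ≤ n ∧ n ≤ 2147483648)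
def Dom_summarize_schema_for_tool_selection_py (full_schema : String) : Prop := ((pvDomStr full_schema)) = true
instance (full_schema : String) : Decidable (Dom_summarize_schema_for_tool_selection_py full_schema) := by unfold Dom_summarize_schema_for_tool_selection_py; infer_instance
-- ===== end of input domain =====

-- B replaces A's per-line flag state machine by a chunk-splitting decomposition (cut the
-- lines at header lines into tagged chunks, then extract from whole chunks); same cost.


-- ===== PORT A =====
-- line.split('`')[1] if '`' in line else None  (when '`' ∈ line, split has ≥ 2 parts,
-- so Python's [1] never raises; pyGet? returns it as `some`)
def pvBacktickName (line : String) : Option String :=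
  if PySem.Str.isIn "`" line then
    PySem.List.pyGet? ((PySem.Str.split? line "`").getD []) 1
  else none

-- one iteration of A's loop over (node_labels, rel_types, relationships,
-- in_node_props, in_rel_props, in_rels); Python's `if label:` truthiness is
-- `label is not None and label != ""`, rendered as `(label).getD "" ≠ ""`
def pvStepA (st : List String × List String × List String × Bool × Bool × Bool)
    (line : String) : List String × List String × List String × Bool × Bool × Bool :=
  let (node_labels, rel_types, relationships, in_node_props, in_rel_props, in_rels) := st
  if PySem.Str.isIn "Node properties:" line then
    (node_labels, rel_types, relationships, true, false, false)
  else if PySem.Str.isIn "Relationship properties:" line then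
    (node_labels, rel_types, relationships, false, true, false)
  else if PySem.Str.isIn "The relationships:" line then
    (node_labels, rel_types, relationships, false, false, true)
  else if in_node_props && PySem.Str.startswith (PySem.Str.strip line) ":`" then
    if (pvBacktickName line).getD "" ≠ "" then
      (node_labels ++ [(pvBacktickName line).getD ""], rel_types, relationships,
       in_node_props, in_rel_props, in_rels)
    else st
  else if in_rel_props && PySem.Str.startswith (PySem.Str.strip line) ":`" then
    if (pvBacktickName line).getD "" ≠ "" then
      (node_labels, rel_types ++ [(pvBacktickName line).getD ""], relationships,
       in_node_props, in_rel_props, in_rels)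
    else st
  else if in_rels && PySem.Str.isIn ")-[:" line then
    (node_labels, rel_types, relationships ++ [PySem.Str.strip line],
     in_node_props, in_rel_props, in_rels)
  else st

def summarize_schema_for_tool_selection_py (full_schema : String) : String :=
  if full_schema = "" || full_schema = "Graph schema not available." then full_schema
  else
    let lines := (PySem.Str.split? full_schema "\n").getD []
    let st := lines.foldl pvStepA ([], [], [], false, false, false)
    let node_labels := st.1
    let rel_types := st.2.1
    let relationships := st.2.2.1
    let summary_parts : List String := []
    let summary_parts := if node_labels ≠ [] then
        summary_parts ++ ["Node labels: " ++ PySem.Str.join ", " (PySem.List.sorted (PySem.Set.ofList node_labels) id)]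
      else summary_parts
    let summary_parts := if rel_types ≠ [] then
        summary_parts ++ ["Relationship types: " ++ PySem.Str.join ", " (PySem.List.sorted (PySem.Set.ofList rel_types) id)]
      else summary_parts
    let summary_parts := if relationships ≠ [] then
        summary_parts ++ ["Key relationships:\n" ++ PySem.Str.join "\n" (PySem.List.slice relationships none (some 10))]
      else summary_parts
    if summary_parts ≠ [] then PySem.Str.join "\n" summary_parts
    else "Graph schema summary not available."

-- ===== PORT B =====
-- Source B's header_kind: precedence of the three header substrings, 0 = no header
def pvHeaderKind (line : String) : Nat :=
  if PySem.Str.isIn "Node properties:" line then 1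
  else if PySem.Str.isIn "Relationship properties:" line then 2
  else if PySem.Str.isIn "The relationships:" line then 3
  else 0

-- Source B's `next((j for j, ln in enumerate(ls) if header_kind(ln)), None)` plus the
-- slices ls[:i] / ls[i+1:], realized exactly as the split at the first header line
def pvSplitHeader : List String → Option (List String × Nat × List String)
  | [] => none
  | l :: ls =>
    if pvHeaderKind l ≠ 0 then some ([], pvHeaderKind l, ls)
    else (pvSplitHeader ls).map (fun p => (l :: p.1, p.2.1, p.2.2))

-- termination measure for pvChunks' while-loop
lemma pvSplitHeader_length : ∀ (ls pre : List String) (k : Nat) (suf : List String),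
    pvSplitHeader ls = some (pre, k, suf) → suf.length < ls.length := by
  intro ls
  induction ls with
  | nil => intro pre k suf h; simp [pvSplitHeader] at h
  | cons l t ih =>
    intro pre k suf h
    simp only [pvSplitHeader] at h
    split_ifs at h with hk
    · cases h
      simp
    · cases hsp : pvSplitHeader t with
      | none => rw [hsp] at h; simp at h
      | some v =>
        rw [hsp] at h
        simp only [Option.map_some, Option.some.injEq, Prod.mk.injEq] at h
        obtain ⟨-, -, h3⟩ := h
        subst h3
        exact Nat.lt_succ_of_lt (ih v.1 v.2.1 v.2.2 (by rw [hsp]))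

-- Source B's chunks(ls, sec): split at header lines, tagging each chunk with its section
def pvChunks (ls : List String) (sec : Nat) : List (Nat × List String) :=
  match _h : pvSplitHeader ls with
  | none => [(sec, ls)]
  | some (pre, k, suf) => (sec, pre) :: pvChunks suf k
termination_by ls.length
decreasing_by exact pvSplitHeader_length ls pre k suf _h

-- Source B's names(chunk) comprehension
def pvNames (chunk : List String) : List String :=
  chunk.filterMap (fun l =>
    if PySem.Str.startswith (PySem.Str.strip l) ":`" ∧ PySem.Str.isIn "`" l ∧
       (PySem.List.pyGet? ((PySem.Str.split? l "`").getD []) 1).getD "" ≠ "" then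
      some ((PySem.List.pyGet? ((PySem.Str.split? l "`").getD []) 1).getD "")
    else none)

-- Source B's relationships comprehension, per chunk
def pvRels (chunk : List String) : List String :=
  chunk.filterMap (fun l =>
    if PySem.Str.isIn ")-[:" l then some (PySem.Str.strip l) else none)

def summarize_schema_for_tool_selection_py_alt (full_schema : String) : String :=
  if full_schema = "" || full_schema = "Graph schema not available." then full_schema
  else
    let parts := pvChunks ((PySem.Str.split? full_schema "\n").getD []) 0
    let node_labels := parts.flatMap (fun p => if p.1 == 1 then pvNames p.2 else [])
    let rel_types := parts.flatMap (fun p => if p.1 == 2 then pvNames p.2 else [])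
    let relationships := parts.flatMap (fun p => if p.1 == 3 then pvRels p.2 else [])
    let summary_parts : List String := []
    let summary_parts := if node_labels ≠ [] then
        summary_parts ++ ["Node labels: " ++ PySem.Str.join ", " (PySem.List.sorted (PySem.Set.ofList node_labels) id)]
      else summary_parts
    let summary_parts := if rel_types ≠ [] then
        summary_parts ++ ["Relationship types: " ++ PySem.Str.join ", " (PySem.List.sorted (PySem.Set.ofList rel_types) id)]
      else summary_parts
    let summary_parts := if relationships ≠ [] then
        summary_parts ++ ["Key relationships:\n" ++ PySem.Str.join "\n" (PySem.List.slice relationships none (some 10))]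
      else summary_parts
    if summary_parts ≠ [] then PySem.Str.join "\n" summary_parts
    else "Graph schema summary not available."

-- ===== PRECONDITION & SPEC =====
def Spec_summarize_schema_for_tool_selection_py (full_schema : String) (out : String) : Prop := out = summarize_schema_for_tool_selection_py_alt full_schema
instance (full_schema : String) (out : String) : Decidable (Spec_summarize_schema_for_tool_selection_py full_schema out) := by unfold Spec_summarize_schema_for_tool_selection_py; infer_instance

-- ===== CLAIM (what is proved, stated in full; the proofs are below) =====
def Claim_equal_summarize_schema_for_tool_selection_py : Prop := ∀ (full_schema : String), Dom_summarize_schema_for_tool_selection_py full_schema → Spec_summarize_schema_for_tool_selection_py full_schema (summarize_schema_for_tool_selection_py full_schema)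

-- ===== LEMMAS AND PROOFS =====

-- proof-only abbreviations: the i-th extraction over the chunks, and the final section
def pvEx (i : Nat) (c : List String) : List String :=
  if i == 3 then pvRels c else pvNames c

def pvE (i : Nat) (lines : List String) (s : Nat) : List String :=
  (pvChunks lines s).flatMap (fun p => if p.1 == i then pvEx i p.2 else [])

def pvF (lines : List String) (s : Nat) : Nat :=
  (pvChunks lines s).foldl (fun _ p => p.1) s

lemma pvChunks_none {ls : List String} (h : pvSplitHeader ls = none) (s : Nat) :
    pvChunks ls s = [(s, ls)] := by
  rw [pvChunks.eq_def]
  split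
  · rfl
  · next pre k suf heq => rw [h] at heq; cases heq

lemma pvChunks_some {ls pre suf : List String} {k : Nat}
    (h : pvSplitHeader ls = some (pre, k, suf)) (s : Nat) :
    pvChunks ls s = (s, pre) :: pvChunks suf k := by
  rw [pvChunks.eq_def]
  split
  · next heq => rw [h] at heq; cases heq
  · next pre' k' suf' heq =>
      rw [h] at heq
      simp only [Option.some.injEq, Prod.mk.injEq] at heq
      obtain ⟨e1, e2, e3⟩ := heq
      rw [e1, e2, e3]

-- the head of pvChunks always carries the starting section
lemma pvChunks_shape (ls : List String) (s : Nat) :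
    ∃ c t, pvChunks ls s = (s, c) :: t := by
  cases h : pvSplitHeader ls with
  | none => exact ⟨ls, [], pvChunks_none h s⟩
  | some v => exact ⟨v.1, pvChunks v.2.2 v.2.1, pvChunks_some (by rw [h]) s⟩

lemma pvF_init_irrel (ls : List String) (k a : Nat) :
    (pvChunks ls k).foldl (fun _ p => p.1) a = pvF ls k := by
  obtain ⟨c, t, h⟩ := pvChunks_shape ls k
  simp [pvF, h]

-- cons with a header line: an empty chunk is emitted and the section switches
lemma pvChunks_cons_header {l : String} (hk : pvHeaderKind l ≠ 0) (ls : List String) (s : Nat) :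
    pvChunks (l :: ls) s = (s, []) :: pvChunks ls (pvHeaderKind l) := by
  have : pvSplitHeader (l :: ls) = some ([], pvHeaderKind l, ls) := by
    simp [pvSplitHeader, hk]
  exact pvChunks_some this s

lemma pvE_cons_header {l : String} (hk : pvHeaderKind l ≠ 0) (i : Nat) (ls : List String) (s : Nat) :
    pvE i (l :: ls) s = pvE i ls (pvHeaderKind l) := by
  unfold pvE
  rw [pvChunks_cons_header hk]
  have hnil : pvEx i [] = [] := by unfold pvEx; split <;> rfl
  simp [hnil]

lemma pvF_cons_header {l : String} (hk : pvHeaderKind l ≠ 0) (ls : List String) (s : Nat) :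
    pvF (l :: ls) s = pvF ls (pvHeaderKind l) := by
  unfold pvF
  rw [pvChunks_cons_header hk]
  simp only [List.foldl_cons]
  exact pvF_init_irrel ls (pvHeaderKind l) s

-- cons with a non-header line: the line joins the first chunk
lemma pvChunks_cons_nonheader {l : String} (h0 : pvHeaderKind l = 0) (ls : List String) (s : Nat) :
    ∃ c t, pvChunks ls s = (s, c) :: t ∧ pvChunks (l :: ls) s = (s, l :: c) :: t := by
  have hsp : pvSplitHeader (l :: ls) = (pvSplitHeader ls).map (fun p => (l :: p.1, p.2.1, p.2.2)) := by
    simp [pvSplitHeader, h0]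
  cases h : pvSplitHeader ls with
  | none =>
    refine ⟨ls, [], pvChunks_none h s, ?_⟩
    exact pvChunks_none (by rw [hsp, h]; rfl) s
  | some v =>
    refine ⟨v.1, pvChunks v.2.2 v.2.1, pvChunks_some (by rw [h]) s, ?_⟩
    exact pvChunks_some (by rw [hsp, h]; rfl) s

lemma pvEx_cons (i : Nat) (l : String) (c : List String) :
    pvEx i (l :: c) = pvEx i [l] ++ pvEx i c := by
  unfold pvEx
  split <;> simp [pvRels, pvNames, List.filterMap_cons] <;> split <;> simp

lemma pvE_cons_nonheader {l : String} (h0 : pvHeaderKind l = 0) (i : Nat) (ls : List String) (s : Nat) :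
    pvE i (l :: ls) s = (if s == i then pvEx i [l] else []) ++ pvE i ls s := by
  obtain ⟨c, t, h1, h2⟩ := pvChunks_cons_nonheader h0 ls s
  unfold pvE
  rw [h1, h2]
  simp only [List.flatMap_cons]
  by_cases hsi : s = i
  · subst hsi
    rw [pvEx_cons]
    simp
  · simp [hsi]

lemma pvF_cons_nonheader {l : String} (h0 : pvHeaderKind l = 0) (ls : List String) (s : Nat) :
    pvF (l :: ls) s = pvF ls s := by
  obtain ⟨c, t, h1, h2⟩ := pvChunks_cons_nonheader h0 ls s
  unfold pvF
  rw [h1, h2]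
  simp

-- B's single-line name extraction agrees with A's `pvBacktickName` truthiness test
lemma pvNames_single (l : String) :
    pvNames [l] =
      if PySem.Str.startswith (PySem.Str.strip l) ":`" ∧ (pvBacktickName l).getD "" ≠ "" then
        [(pvBacktickName l).getD ""]
      else [] := by
  unfold pvNames pvBacktickName
  simp [List.filterMap]
  split_ifs <;> tauto

lemma pvRels_single (l : String) :
    pvRels [l] = if PySem.Str.isIn ")-[:" l then [PySem.Str.strip l] else [] := by
  unfold pvRels
  simp only [List.filterMap_cons, List.filterMap_nil]
  split_ifs with h <;> rfl

-- main invariant: A's flag-driven fold equals B's chunkwise extraction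
lemma pvMain : ∀ (lines : List String) (s : Nat) (la lr lc : List String),
    lines.foldl pvStepA (la, lr, lc, s == 1, s == 2, s == 3) =
      (la ++ pvE 1 lines s, lr ++ pvE 2 lines s, lc ++ pvE 3 lines s,
       pvF lines s == 1, pvF lines s == 2, pvF lines s == 3) := by
  intro lines
  induction lines with
  | nil =>
    intro s la lr lc
    have h : pvSplitHeader ([] : List String) = none := rfl
    have hE : ∀ i, pvE i [] s = [] := by
      intro i; unfold pvE; rw [pvChunks_none h]
      have hnil : pvEx i [] = [] := by unfold pvEx; split <;> rfl
      simp [hnil]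
    have hF : pvF [] s = s := by unfold pvF; rw [pvChunks_none h]; rfl
    simp [hE, hF]
  | cons l rest ih =>
    intro s la lr lc
    simp only [List.foldl_cons, pvStepA]
    by_cases h1 : PySem.Str.isIn "Node properties:" l = true
    · rw [if_pos h1]
      have hk : pvHeaderKind l = 1 := by unfold pvHeaderKind; rw [if_pos h1]
      have hne : pvHeaderKind l ≠ 0 := by rw [hk]; omega
      rw [pvE_cons_header hne 1 rest s, pvE_cons_header hne 2 rest s,
          pvE_cons_header hne 3 rest s, pvF_cons_header hne rest s, hk]
      exact ih 1 la lr lc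
    rw [if_neg h1]
    by_cases h2 : PySem.Str.isIn "Relationship properties:" l = true
    · rw [if_pos h2]
      have hk : pvHeaderKind l = 2 := by unfold pvHeaderKind; rw [if_neg h1, if_pos h2]
      have hne : pvHeaderKind l ≠ 0 := by rw [hk]; omega
      rw [pvE_cons_header hne 1 rest s, pvE_cons_header hne 2 rest s,
          pvE_cons_header hne 3 rest s, pvF_cons_header hne rest s, hk]
      exact ih 2 la lr lc
    rw [if_neg h2]
    by_cases h3 : PySem.Str.isIn "The relationships:" l = true
    · rw [if_pos h3]
      have hk : pvHeaderKind l = 3 := by unfold pvHeaderKind; rw [if_neg h1, if_neg h2, if_pos h3]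
      have hne : pvHeaderKind l ≠ 0 := by rw [hk]; omega
      rw [pvE_cons_header hne 1 rest s, pvE_cons_header hne 2 rest s,
          pvE_cons_header hne 3 rest s, pvF_cons_header hne rest s, hk]
      exact ih 3 la lr lc
    rw [if_neg h3]
    have h0 : pvHeaderKind l = 0 := by unfold pvHeaderKind; rw [if_neg h1, if_neg h2, if_neg h3]
    rw [pvE_cons_nonheader h0 1 rest s, pvE_cons_nonheader h0 2 rest s,
        pvE_cons_nonheader h0 3 rest s, pvF_cons_nonheader h0 rest s]
    by_cases hs1 : s = 1
    · subst hs1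
      simp only [Nat.reduceBEq, Bool.false_eq_true, if_false, beq_self_eq_true, if_true,
                 show pvEx 1 [l] = pvNames [l] from rfl]
      by_cases hP : PySem.Str.startswith (PySem.Str.strip l) ":`" = true
      · rw [if_pos (show ((true && PySem.Str.startswith (PySem.Str.strip l) ":`") = true) from by rw [Bool.true_and]; exact hP)]
        rcases hbt : pvBacktickName l with _ | v
        · have hN : pvNames [l] = [] := by
            rw [pvNames_single, hbt, if_neg (by rintro ⟨-, h⟩; exact h rfl)]
          rw [if_neg (show ¬(((Option.none : Option String).getD "") ≠ "") from by simp)]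
          refine (ih 1 la lr lc).trans ?_
          simp [hN]
        · by_cases hv : v = ""
          · have hN : pvNames [l] = [] := by
              rw [pvNames_single, hbt, if_neg (by rintro ⟨-, h⟩; exact h (by simp [hv]))]
            rw [if_neg (show ¬(((some v).getD "" : String) ≠ "") from by simp [hv])]
            refine (ih 1 la lr lc).trans ?_
            simp [hN]
          · have hN : pvNames [l] = [v] := by
              rw [pvNames_single, hbt, if_pos ⟨hP, by simpa using hv⟩]
              rfl
            rw [if_pos (show (((some v).getD "" : String) ≠ "") from by simpa using hv)]
            simp only [Option.getD_some]
            refine (ih 1 (la ++ [v]) lr lc).trans ?_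
            simp [hN, List.append_assoc]
      · have hN : pvNames [l] = [] := by
          rw [pvNames_single, if_neg (by rintro ⟨h, -⟩; exact hP h)]
        rw [if_neg (show ¬((true && PySem.Str.startswith (PySem.Str.strip l) ":`") = true) from by rw [Bool.true_and]; exact hP)]
        rw [if_neg (show ¬((false && PySem.Str.startswith (PySem.Str.strip l) ":`") = true) from by rw [Bool.false_and]; exact Bool.false_ne_true)]
        rw [if_neg (show ¬((false && PySem.Str.isIn ")-[:" l) = true) from by rw [Bool.false_and]; exact Bool.false_ne_true)]
        refine (ih 1 la lr lc).trans ?_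
        simp [hN]
    by_cases hs2 : s = 2
    · subst hs2
      simp only [Nat.reduceBEq, Bool.false_eq_true, if_false, beq_self_eq_true, if_true,
                 show pvEx 2 [l] = pvNames [l] from rfl]
      rw [if_neg (show ¬((false && PySem.Str.startswith (PySem.Str.strip l) ":`") = true) from by rw [Bool.false_and]; exact Bool.false_ne_true)]
      by_cases hP : PySem.Str.startswith (PySem.Str.strip l) ":`" = true
      · rw [if_pos (show ((true && PySem.Str.startswith (PySem.Str.strip l) ":`") = true) from by rw [Bool.true_and]; exact hP)]
        rcases hbt : pvBacktickName l with _ | v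
        · have hN : pvNames [l] = [] := by
            rw [pvNames_single, hbt, if_neg (by rintro ⟨-, h⟩; exact h rfl)]
          rw [if_neg (show ¬(((Option.none : Option String).getD "") ≠ "") from by simp)]
          refine (ih 2 la lr lc).trans ?_
          simp [hN]
        · by_cases hv : v = ""
          · have hN : pvNames [l] = [] := by
              rw [pvNames_single, hbt, if_neg (by rintro ⟨-, h⟩; exact h (by simp [hv]))]
            rw [if_neg (show ¬(((some v).getD "" : String) ≠ "") from by simp [hv])]
            refine (ih 2 la lr lc).trans ?_
            simp [hN]
          · have hN : pvNames [l] = [v] := by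
              rw [pvNames_single, hbt, if_pos ⟨hP, by simpa using hv⟩]
              rfl
            rw [if_pos (show (((some v).getD "" : String) ≠ "") from by simpa using hv)]
            simp only [Option.getD_some]
            refine (ih 2 la (lr ++ [v]) lc).trans ?_
            simp [hN, List.append_assoc]
      · have hN : pvNames [l] = [] := by
          rw [pvNames_single, if_neg (by rintro ⟨h, -⟩; exact hP h)]
        rw [if_neg (show ¬((true && PySem.Str.startswith (PySem.Str.strip l) ":`") = true) from by rw [Bool.true_and]; exact hP)]
        rw [if_neg (show ¬((false && PySem.Str.isIn ")-[:" l) = true) from by rw [Bool.false_and]; exact Bool.false_ne_true)]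
        refine (ih 2 la lr lc).trans ?_
        simp [hN]
    by_cases hs3 : s = 3
    · subst hs3
      simp only [Nat.reduceBEq, Bool.false_eq_true, if_false, beq_self_eq_true, if_true,
                 show pvEx 3 [l] = pvRels [l] from rfl]
      rw [if_neg (show ¬((false && PySem.Str.startswith (PySem.Str.strip l) ":`") = true) from by rw [Bool.false_and]; exact Bool.false_ne_true)]
      rw [if_neg (show ¬((false && PySem.Str.startswith (PySem.Str.strip l) ":`") = true) from by rw [Bool.false_and]; exact Bool.false_ne_true)]
      by_cases hR : PySem.Str.isIn ")-[:" l = true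
      · have hN : pvRels [l] = [PySem.Str.strip l] := by rw [pvRels_single, if_pos hR]
        rw [if_pos (show ((true && PySem.Str.isIn ")-[:" l) = true) from by rw [Bool.true_and]; exact hR)]
        refine (ih 3 la lr (lc ++ [PySem.Str.strip l])).trans ?_
        simp [hN, List.append_assoc]
      · have hN : pvRels [l] = [] := by rw [pvRels_single, if_neg hR]
        rw [if_neg (show ¬((true && PySem.Str.isIn ")-[:" l) = true) from by rw [Bool.true_and]; exact hR)]
        refine (ih 3 la lr lc).trans ?_
        simp [hN]
    -- s outside {1,2,3}: the line is dropped by both programs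
    · have e1 : (s == 1) = false := by simp [hs1]
      have e2 : (s == 2) = false := by simp [hs2]
      have e3 : (s == 3) = false := by simp [hs3]
      rw [if_neg (show ¬(((s == 1) && PySem.Str.startswith (PySem.Str.strip l) ":`") = true) from by simp [e1])]
      rw [if_neg (show ¬(((s == 2) && PySem.Str.startswith (PySem.Str.strip l) ":`") = true) from by simp [e2])]
      rw [if_neg (show ¬(((s == 3) && PySem.Str.isIn ")-[:" l) = true) from by simp [e3])]
      refine (ih s la lr lc).trans ?_
      simp [e1, e2, e3]

-- ===== VERDICT (by name: the statement is the Claim_ definition above) =====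
theorem summarize_schema_for_tool_selection_py_spec : Claim_equal_summarize_schema_for_tool_selection_py := by
  intro full_schema _
  unfold Spec_summarize_schema_for_tool_selection_py
  unfold summarize_schema_for_tool_selection_py summarize_schema_for_tool_selection_py_alt
  split_ifs
  · rfl
  · have h := pvMain ((PySem.Str.split? full_schema "\n").getD []) 0 [] [] []
    simp only [Nat.reduceBEq] at h
    simp only [h, List.nil_append]
    rfl
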